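-- pv_equiv track=rewrite | github.com/karstenheld3/SharePoint-GPT-Middleware | .windsurf/skills/coding-conventions/reindent.py | reindent_content
-- ===== SOURCE A (Python) =====
-- def reindent_content(content: str, from_spaces: int, to_spaces: int) -> str:
--   """Convert indentation in Python source code."""
--   if from_spaces == to_spaces: return content
--
--   lines = content.split('\n')
--   result = []
--
--   for line in lines:
--     if not line or line.isspace():
--       result.append(line)
--       continue
--
--     # Count leading spaces
--     stripped = line.lstrip(' ')
--     leading_spaces = len(line) - len(stripped)
--
--     if leading_spaces == 0:
--       result.append(line)
--       continue
--
--     # Calculate new indentation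
--     indent_levels = leading_spaces // from_spaces
--     remainder = leading_spaces % from_spaces
--     new_indent = ' ' * (indent_levels * to_spaces + remainder)
--     result.append(new_indent + stripped)
--
--   return '\n'.join(result)
-- ===== SOURCE B (Python) =====
-- def reindent_content(content: str, from_spaces: int, to_spaces: int) -> str:
--   """Convert indentation in Python source code (single pass over the characters,
--   no split/join: the string is rewritten line by line in one streaming scan)."""
--   if from_spaces == to_spaces:
--     return content
--   out = []
--   i, n = 0, len(content)
--   while i < n:
--     # start of a line: measure the run of leading spaces
--     j = i
--     while j < n and content[j] == ' ':
--       j += 1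
--     # scan to the end of the line, noting whether it has visible text
--     k = j
--     has_text = False
--     while k < n and content[k] != '\n':
--       if not content[k].isspace():
--         has_text = True
--       k += 1
--     m = j - i
--     if m > 0 and has_text:
--       out.append(' ' * ((m // from_spaces) * to_spaces + m % from_spaces))
--     else:
--       out.append(' ' * m)
--     out.append(content[j:k])
--     if k < n:
--       out.append('\n')
--     i = k + 1
--   return ''.join(out)
-- ===== Notes on version B (the rewrite author's own statement) =====
-- stated objective: alternative
-- what changed: Replaces split('\n')/per-line branch ladder/join with a single streaming scan over the characters that rewrites each leading-space run in place, building the output incrementally.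
import Mathlib
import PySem

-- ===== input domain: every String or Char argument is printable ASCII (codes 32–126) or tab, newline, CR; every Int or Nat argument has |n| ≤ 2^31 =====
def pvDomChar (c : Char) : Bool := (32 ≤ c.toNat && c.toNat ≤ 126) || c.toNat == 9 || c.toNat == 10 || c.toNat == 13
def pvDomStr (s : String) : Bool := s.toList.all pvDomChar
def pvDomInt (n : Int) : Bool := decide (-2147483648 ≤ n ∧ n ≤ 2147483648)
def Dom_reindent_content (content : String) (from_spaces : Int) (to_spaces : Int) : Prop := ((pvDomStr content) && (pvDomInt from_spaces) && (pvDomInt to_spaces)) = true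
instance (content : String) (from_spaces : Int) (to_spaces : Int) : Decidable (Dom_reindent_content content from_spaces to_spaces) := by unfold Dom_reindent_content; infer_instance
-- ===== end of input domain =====

-- B replaces A's split('\n') / per-line branch ladder / join with a single streaming scan over the
-- characters that rewrites each leading-space run in place (objective: alternative decomposition).

-- ===== PORT A =====
-- Port of A: split into lines, loop appending a (possibly reindented) line, join.
-- line.lstrip(' ') is ported by hand as dropWhile (· == ' '): it drops exactly the leading spaces.
def reindent_content (content : String) (from_spaces : Int) (to_spaces : Int) : String :=
  if from_spaces = to_spaces then content
  else
    let lines := PySem.Chars.splitOn content.toList ['\n']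
    let result := lines.foldl (fun acc line =>
      if line.isEmpty || PySem.Chars.strIsspace line then acc ++ [line]
      else
        let stripped := line.dropWhile (fun c => c == ' ')
        let leading : Int := (line.length : Int) - (stripped.length : Int)
        if leading = 0 then acc ++ [line]
        else
          let indent_levels := PySem.Int.floordiv leading from_spaces
          let remainder := PySem.Int.mod leading from_spaces
          acc ++ [PySem.List.pyRepeat [' '] (indent_levels * to_spaces + remainder) ++ stripped]) []
    String.ofList (PySem.Chars.join ['\n'] result)

-- ===== PORT B =====
-- B's inner while loops: split off the current line (chars up to the first '\n'), telling whether
-- a '\n' was consumed (some rest) or the string ended (none).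
def pvSplitLine : List Char → List Char × Option (List Char)
  | [] => ([], none)
  | c :: t =>
    if c = '\n' then ([], some t)
    else
      let p := pvSplitLine t
      (c :: p.1, p.2)

theorem pvSplitLine_some_length : ∀ (cs r : List Char), (pvSplitLine cs).2 = some r → r.length < cs.length := by
  intro cs
  induction cs with
  | nil => intro r h; simp [pvSplitLine] at h
  | cons c t ih =>
    intro r h
    by_cases hc : c = '\n'
    · simp [pvSplitLine, hc] at h; simp [← h]
    · simp [pvSplitLine, hc] at h
      exact Nat.lt_succ_of_lt (ih r h)

-- B's per-line body: measure the run of leading spaces (m) and whether the line has visible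
-- text; emit the rescaled (or original) indentation followed by the rest of the line.
-- ' ' * m with m : Nat is List.replicate m ' ' (exact: m ≥ 0).
def pvFix (from_spaces : Int) (to_spaces : Int) (line : List Char) : List Char :=
  let m := (line.takeWhile (fun c => c == ' ')).length
  let rest := line.dropWhile (fun c => c == ' ')
  let has_text := rest.any (fun c => !PySem.Chars.isspace c)
  if 0 < m && has_text then
    PySem.List.pyRepeat [' '] (PySem.Int.floordiv (m : Int) from_spaces * to_spaces + PySem.Int.mod (m : Int) from_spaces) ++ rest
  else
    List.replicate m ' ' ++ rest

-- B's outer while loop: handle one line, emit '\n' if one was consumed, continue on the rest.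
def pvGo (from_spaces : Int) (to_spaces : Int) : List Char → List Char
  | [] => []
  | c :: t =>
    match h : pvSplitLine (c :: t) with
    | (line, none) => pvFix from_spaces to_spaces line
    | (line, some rest) => pvFix from_spaces to_spaces line ++ '\n' :: pvGo from_spaces to_spaces rest
  termination_by cs => cs.length
  decreasing_by exact pvSplitLine_some_length (c :: t) rest (by rw [h])

def reindent_content_alt (content : String) (from_spaces : Int) (to_spaces : Int) : String :=
  if from_spaces = to_spaces then content
  else String.ofList (pvGo from_spaces to_spaces content.toList)

-- ===== PRECONDITION & SPEC =====
-- Pre_ excludes exactly the inputs on which the Python A raises ZeroDivisionError: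
-- from_spaces = 0 ≠ to_spaces while some line starts with a space and contains visible text
-- (B raises there too; outside these both return normally).
def Pre_reindent_content (content : String) (from_spaces : Int) (to_spaces : Int) : Prop :=
  from_spaces = to_spaces ∨ from_spaces ≠ 0 ∨
    ((PySem.Chars.splitOn content.toList ['\n']).all
      (fun l => !(l.head? == some ' ' && l.any (fun c => !PySem.Chars.isspace c))) = true)
instance (content : String) (from_spaces : Int) (to_spaces : Int) : Decidable (Pre_reindent_content content from_spaces to_spaces) := by unfold Pre_reindent_content; infer_instance

def pvWitness_reindent_content : String × Int × Int := ("def f():\n  if x:\n    return 1\n", 2, 4)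

def Spec_reindent_content (content : String) (from_spaces : Int) (to_spaces : Int) (out : String) : Prop := out = reindent_content_alt content from_spaces to_spaces
instance (content : String) (from_spaces : Int) (to_spaces : Int) (out : String) : Decidable (Spec_reindent_content content from_spaces to_spaces out) := by unfold Spec_reindent_content; infer_instance

-- ===== CLAIM (what is proved, stated in full; the proofs are below) =====
def Claim_equal_reindent_content : Prop := ∀ (content : String) (from_spaces : Int) (to_spaces : Int), Dom_reindent_content content from_spaces to_spaces → Pre_reindent_content content from_spaces to_spaces → Spec_reindent_content content from_spaces to_spaces (reindent_content content from_spaces to_spaces)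

-- ===== LEMMAS AND PROOFS =====

-- A's loop body as a function of the line (proof helper).
def pvLineA (from_spaces : Int) (to_spaces : Int) (line : List Char) : List Char :=
  if line.isEmpty || PySem.Chars.strIsspace line then line
  else
    let stripped := line.dropWhile (fun c => c == ' ')
    let leading : Int := (line.length : Int) - (stripped.length : Int)
    if leading = 0 then line
    else
      let indent_levels := PySem.Int.floordiv leading from_spaces
      let remainder := PySem.Int.mod leading from_spaces
      PySem.List.pyRepeat [' '] (indent_levels * to_spaces + remainder) ++ stripped

-- Reference split-on-'\n' (structural), and its link to PySem.Chars.splitOn.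
def refSplit : List Char → List (List Char)
  | [] => [[]]
  | c :: t =>
    if c = '\n' then [] :: refSplit t
    else
      match refSplit t with
      | [] => [[c]]
      | h :: r => (c :: h) :: r

def consHead (x : List Char) : List (List Char) → List (List Char)
  | [] => [x]
  | h :: t => (x ++ h) :: t

theorem refSplit_ne_nil (cs : List Char) : refSplit cs ≠ [] := by
  cases cs with
  | nil => simp [refSplit]
  | cons c t =>
    by_cases hc : c = '\n'
    · simp [refSplit, hc]
    · simp only [refSplit, hc]
      cases refSplit t <;> simp

theorem consHead_nil (l : List (List Char)) (h : l ≠ []) : consHead [] l = l := by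
  cases l with
  | nil => exact absurd rfl h
  | cons a t => simp [consHead]

theorem go_spec : ∀ (l : List Char) (fuel : Nat) (cur : List Char) (acc : List (List Char)),
    l.length < fuel →
    PySem.Chars.splitOn.go ['\n'] fuel l cur acc = acc.reverse ++ consHead cur.reverse (refSplit l) := by
  intro l
  induction l with
  | nil =>
    intro fuel cur acc h
    match fuel with
    | f + 1 => simp [PySem.Chars.splitOn.go, refSplit, consHead]
  | cons c t ih =>
    intro fuel cur acc h
    match fuel, h with
    | f + 1, h =>
      have ht : t.length < f := by simpa using h
      by_cases hc : c = '\n'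
      · have hpre : List.isPrefixOf ['\n'] (c :: t) = true := by simp [List.isPrefixOf, hc]
        rw [PySem.Chars.splitOn.go]
        simp only [hpre, if_pos]
        rw [show List.drop (List.length ['\n']) (c :: t) = t by simp]
        rw [ih f [] (cur.reverse :: acc) ht]
        rw [List.reverse_nil, consHead_nil _ (refSplit_ne_nil t)]
        simp [refSplit, hc, consHead]
      · have hpre : List.isPrefixOf ['\n'] (c :: t) = false := by
          simp [List.isPrefixOf]
          exact fun hb => absurd (by exact hb ▸ rfl : c = '\n') hc
        rw [PySem.Chars.splitOn.go]
        simp only [hpre]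
        rw [if_neg (by simp)]
        rw [ih f (c :: cur) acc ht]
        simp only [refSplit, hc, if_neg]
        obtain ⟨hh, rr, hr⟩ : ∃ hh rr, refSplit t = hh :: rr := by
          cases hq : refSplit t with
          | nil => exact absurd hq (refSplit_ne_nil t)
          | cons a b => exact ⟨a, b, rfl⟩
        rw [hr]
        simp [consHead]

theorem splitOn_eq_refSplit (cs : List Char) : PySem.Chars.splitOn cs ['\n'] = refSplit cs := by
  unfold PySem.Chars.splitOn
  rw [go_spec cs (cs.length + 1) [] [] (by omega)]
  simp [consHead_nil _ (refSplit_ne_nil cs)]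

theorem refSplit_no_nl (cs : List Char) (h : '\n' ∉ cs) : refSplit cs = [cs] := by
  induction cs with
  | nil => rfl
  | cons c t ih =>
    have hc : ¬ c = '\n' := fun hc => h (by simp [hc])
    have ht : '\n' ∉ t := fun hm => h (by simp [hm])
    simp [refSplit, hc, ih ht]

theorem refSplit_append (l r : List Char) (h : '\n' ∉ l) :
    refSplit (l ++ '\n' :: r) = l :: refSplit r := by
  induction l with
  | nil => simp [refSplit]
  | cons c t ih =>
    have hc : ¬ c = '\n' := fun hc => h (by simp [hc])
    have ht : '\n' ∉ t := fun hm => h (by simp [hm])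
    simp [refSplit, hc, ih ht]

theorem pvSplitLine_no_nl (cs : List Char) (h : '\n' ∉ cs) : pvSplitLine cs = (cs, none) := by
  induction cs with
  | nil => rfl
  | cons c t ih =>
    have hc : ¬ c = '\n' := fun hc => h (by simp [hc])
    have ht : '\n' ∉ t := fun hm => h (by simp [hm])
    simp [pvSplitLine, hc, ih ht]

theorem pvSplitLine_append (l r : List Char) (h : '\n' ∉ l) :
    pvSplitLine (l ++ '\n' :: r) = (l, some r) := by
  induction l with
  | nil => simp [pvSplitLine]
  | cons c t ih =>
    have hc : ¬ c = '\n' := fun hc => h (by simp [hc])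
    have ht : '\n' ∉ t := fun hm => h (by simp [hm])
    simp [pvSplitLine, hc, ih ht]

theorem nl_decomp (cs : List Char) :
    '\n' ∉ cs ∨ ∃ l r, cs = l ++ '\n' :: r ∧ '\n' ∉ l := by
  induction cs with
  | nil => left; simp
  | cons c t ih =>
    by_cases hc : c = '\n'
    · right; exact ⟨[], t, by simp [hc], by simp⟩
    · rcases ih with hno | ⟨l, r, hlr, hl⟩
      · left; simp [hc, hno]
        exact fun h => hc h.symm
      · right
        exact ⟨c :: l, r, by simp [hlr], by simp [hl]; exact fun h => hc h.symm⟩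

theorem takeWhile_space_replicate (line : List Char) :
    line.takeWhile (fun c => c == ' ') =
      List.replicate (line.takeWhile (fun c => c == ' ')).length ' ' := by
  rw [List.eq_replicate_iff]
  exact ⟨rfl, fun b hb => by simpa using List.mem_takeWhile_imp hb⟩

theorem pvFix_eq_pvLineA (fs ts : Int) (line : List Char) :
    pvFix fs ts line = pvLineA fs ts line := by
  unfold pvFix pvLineA
  set tw := line.takeWhile (fun c => c == ' ') with htw
  set rest := line.dropWhile (fun c => c == ' ') with hrest
  have hsplit : tw ++ rest = line := List.takeWhile_append_dropWhile
  have hrep : tw = List.replicate tw.length ' ' := takeWhile_space_replicate line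
  have hlen : line.length = tw.length + rest.length := by
    rw [← hsplit]; simp
  have hleading : (line.length : Int) - (rest.length : Int) = (tw.length : Int) := by
    rw [hlen]; push_cast; ring
  by_cases hemp : line.isEmpty
  · have hnil : line = [] := by simpa [List.isEmpty_iff] using hemp
    subst hnil
    simp [htw, hrest]
  · by_cases hsp : PySem.Chars.strIsspace line
    · -- all-whitespace line: no rescale on either side
      have hall : ∀ c ∈ line, PySem.Chars.isspace c = true := by
        intro c hcmem
        have := hsp
        unfold PySem.Chars.strIsspace at this
        simp only [Bool.and_eq_true, List.all_eq_true] at this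
        exact this.2 c hcmem
      have hanyf : rest.any (fun c => !PySem.Chars.isspace c) = false := by
        simp only [List.any_eq_false]
        intro c hcmem
        have : c ∈ line := by rw [← hsplit]; exact List.mem_append_right _ hcmem
        simp [hall c this]
      simp only [hemp, hsp, Bool.false_or, if_pos]
      rw [hanyf]
      simp only [Bool.and_false, Bool.false_eq_true, if_neg, Bool.not_eq_true]
      rw [← hrep]; exact hsplit
    · simp only [hemp, hsp, Bool.or_self, Bool.false_or, if_neg, Bool.not_eq_true]
      by_cases hm : (0 : Nat) < tw.length
      · -- indented line with visible text: rescale on both sides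
        have hne : line ≠ [] := by simpa [List.isEmpty_iff] using hemp
        have hex : ∃ c ∈ line, ¬ PySem.Chars.isspace c := by
          by_contra hcon
          push_neg at hcon
          apply hsp
          unfold PySem.Chars.strIsspace
          simp only [Bool.and_eq_true, List.all_eq_true]
          exact ⟨by simpa [List.isEmpty_iff] using hne, fun c hc => by simpa using hcon c hc⟩
        obtain ⟨c, hcmem, hcns⟩ := hex
        have hcrest : c ∈ rest := by
          rw [← hsplit] at hcmem
          rcases List.mem_append.mp hcmem with h1 | h2
          · have hce : c = ' ' := by simpa using List.mem_takeWhile_imp h1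
            exact absurd (show (PySem.Chars.isspace c) = true by rw [hce]; decide)
              (by simpa using hcns)
          · exact h2
        have hany : rest.any (fun c => !PySem.Chars.isspace c) = true := by
          simp only [List.any_eq_true]
          exact ⟨c, hcrest, by simpa using hcns⟩
        have hm' : decide (0 < tw.length) = true := by simpa using hm
        rw [hany, hm']
        simp only [Bool.and_self, if_pos]
        have hlead0 : ¬ ((line.length : Int) - (rest.length : Int) = 0) := by
          rw [hleading]
          exact fun hq => (by omega : tw.length ≠ 0) (by exact_mod_cast hq)
        rw [if_neg hlead0, hleading]
      · -- no leading spaces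
        have h0 : tw.length = 0 := by omega
        have htw0 : tw = [] := by rw [hrep, h0]; rfl
        have hlead0 : (line.length : Int) - (rest.length : Int) = 0 := by
          rw [hleading, h0]; rfl
        rw [if_pos hlead0]
        have : decide (0 < tw.length) = false := by simp [h0]
        rw [this]
        simp only [Bool.false_and, Bool.false_eq_true, if_neg, Bool.not_eq_true]
        rw [h0]
        simpa using (htw0 ▸ hsplit : [] ++ rest = line)

theorem pvGo_eq (fs ts : Int) : ∀ (cs : List Char),
    pvGo fs ts cs = PySem.Chars.join ['\n'] ((refSplit cs).map (pvLineA fs ts)) := by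
  intro cs
  induction hn : cs.length using Nat.strong_induction_on generalizing cs with
  | _ n ih =>
  rcases nl_decomp cs with hno | ⟨l, r, hlr, hl⟩
  · rw [refSplit_no_nl cs hno]
    rw [List.map_singleton, PySem.Chars.join_singleton]
    cases cs with
    | nil => simp [pvGo, pvLineA]
    | cons c t =>
      rw [pvGo, pvSplitLine_no_nl (c :: t) hno]
      exact pvFix_eq_pvLineA fs ts (c :: t)
  · subst hlr
    have hsl : pvSplitLine (l ++ '\n' :: r) = (l, some r) := pvSplitLine_append l r hl
    have hstep : pvGo fs ts (l ++ '\n' :: r) = pvFix fs ts l ++ '\n' :: pvGo fs ts r := by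
      cases hc : l ++ '\n' :: r with
      | nil => exact absurd hc (by simp)
      | cons c t =>
        rw [← hc, hc, pvGo, ← hc, hsl]
    rw [hstep, refSplit_append l r hl, List.map_cons]
    obtain ⟨hh, rr, hr⟩ : ∃ hh rr, refSplit r = hh :: rr := by
      cases hq : refSplit r with
      | nil => exact absurd hq (refSplit_ne_nil r)
      | cons a b => exact ⟨a, b, rfl⟩
    have hrec : pvGo fs ts r = PySem.Chars.join ['\n'] ((refSplit r).map (pvLineA fs ts)) := by
      exact ih r.length (by subst hn; simp; omega) r rfl
    rw [hr] at hrec ⊢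
    rw [List.map_cons, PySem.Chars.join_cons_cons, ← List.map_cons, ← hrec]
    rw [pvFix_eq_pvLineA]
    simp

-- ===== VERDICT (by name: the statement is the Claim_ definition above) =====
theorem reindent_content_spec : Claim_equal_reindent_content := by
  unfold Claim_equal_reindent_content
  intro content fs ts _hdom _hpre
  unfold Spec_reindent_content reindent_content reindent_content_alt
  by_cases hft : fs = ts
  · rw [if_pos hft, if_pos hft]
  · rw [if_neg hft, if_neg hft]
    have hbody : (fun (acc : List (List Char)) (line : List Char) =>
        if line.isEmpty || PySem.Chars.strIsspace line then acc ++ [line]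
        else
          let stripped := line.dropWhile (fun c => c == ' ')
          let leading : Int := (line.length : Int) - (stripped.length : Int)
          if leading = 0 then acc ++ [line]
          else
            let indent_levels := PySem.Int.floordiv leading fs
            let remainder := PySem.Int.mod leading fs
            acc ++ [PySem.List.pyRepeat [' '] (indent_levels * ts + remainder) ++ stripped]) =
        (fun acc line => acc ++ [pvLineA fs ts line]) := by
      funext acc line
      unfold pvLineA
      by_cases h1 : (line.isEmpty || PySem.Chars.strIsspace line) = true
      · simp [h1]
      · by_cases h2 : ((line.length : Int) - ((line.dropWhile (fun c => c == ' ')).length : Int)) = 0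
        · simp [h1, h2]
        · simp [h1, h2]
    simp only [hbody]
    rw [PySem.List.foldl_append_singleton_eq_map]
    rw [List.nil_append, splitOn_eq_refSplit, pvGo_eq]
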